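-- pv_equiv track=rewrite | github.com/BertRules/Global_reconstruction_of_language_models_with_linguistic_rules | rule/opinionrulemine.py | __get_term_pos_type_op
-- ===== SOURCE A (Python) =====
-- def __get_term_pos_type_op(term_pos_tags):
--     for t in term_pos_tags:
--         if t  == 'OP_A':
--             return 'OP_A'
--     for t in term_pos_tags:
--         if t == 'OP_O':
--             return 'OP_O'
--     return None
-- ===== SOURCE B (Python) =====
-- def __get_term_pos_type_op(term_pos_tags):
--     saw_O = False
--     for t in term_pos_tags:
--         if t == 'OP_A':
--             return 'OP_A'
--         if t == 'OP_O':
--             saw_O = True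
--     return 'OP_O' if saw_O else None
-- ===== Notes on version B (the rewrite author's own statement) =====
-- stated objective: alternative
-- what changed: Replaces A's two sequential scans with a single pass that returns 'OP_A' immediately and tracks whether 'OP_O' was seen in a flag, deciding after the loop.
import Mathlib
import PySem

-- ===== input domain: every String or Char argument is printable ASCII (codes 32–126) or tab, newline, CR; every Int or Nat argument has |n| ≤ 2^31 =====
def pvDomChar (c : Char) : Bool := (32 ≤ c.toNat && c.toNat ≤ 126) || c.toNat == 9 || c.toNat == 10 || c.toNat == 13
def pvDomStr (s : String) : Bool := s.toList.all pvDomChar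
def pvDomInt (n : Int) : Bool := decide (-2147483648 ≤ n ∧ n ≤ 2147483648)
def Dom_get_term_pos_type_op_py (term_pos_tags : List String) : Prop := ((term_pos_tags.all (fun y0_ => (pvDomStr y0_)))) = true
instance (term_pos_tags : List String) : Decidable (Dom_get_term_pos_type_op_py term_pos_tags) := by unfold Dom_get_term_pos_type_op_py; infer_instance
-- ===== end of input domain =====

-- B fuses A's two scans into one pass with a saw_O flag (objective: alternative decomposition, same cost).

-- ===== PORT A =====
-- first loop: return 'OP_A' on first match
def pvA_scanA (l : List String) : Option String :=
  match l with
  | [] => none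
  | t :: rest => if t = "OP_A" then some "OP_A" else pvA_scanA rest

-- second loop: return 'OP_O' on first match
def pvA_scanO (l : List String) : Option String :=
  match l with
  | [] => none
  | t :: rest => if t = "OP_O" then some "OP_O" else pvA_scanO rest

def get_term_pos_type_op_py (term_pos_tags : List String) : Option String :=
  match pvA_scanA term_pos_tags with
  | some r => some r
  | none =>
    match pvA_scanO term_pos_tags with
    | some r => some r
    | none => none

-- ===== PORT B =====
-- single pass carrying the saw_O flag
def pvB_loop (l : List String) (sawO : Bool) : Option String :=
  match l with
  | [] => if sawO then some "OP_O" else none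
  | t :: rest =>
    if t = "OP_A" then some "OP_A"
    else pvB_loop rest (sawO || t = "OP_O")

def get_term_pos_type_op_py_alt (term_pos_tags : List String) : Option String :=
  pvB_loop term_pos_tags false

-- ===== PRECONDITION & SPEC =====
def Spec_get_term_pos_type_op_py (term_pos_tags : List String) (out : Option String) : Prop := out = get_term_pos_type_op_py_alt term_pos_tags
instance (term_pos_tags : List String) (out : Option String) : Decidable (Spec_get_term_pos_type_op_py term_pos_tags out) := by unfold Spec_get_term_pos_type_op_py; infer_instance

-- ===== CLAIM (what is proved, stated in full; the proofs are below) =====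
def Claim_equal_get_term_pos_type_op_py : Prop := ∀ (term_pos_tags : List String), Dom_get_term_pos_type_op_py term_pos_tags → Spec_get_term_pos_type_op_py term_pos_tags (get_term_pos_type_op_py term_pos_tags)

-- ===== LEMMAS AND PROOFS =====
-- A's first scan returns some "OP_A" iff "OP_A" is in the list
theorem pvA_scanA_eq (l : List String) :
    pvA_scanA l = if "OP_A" ∈ l then some "OP_A" else none := by
  induction l with
  | nil => rfl
  | cons t rest ih =>
    simp only [pvA_scanA, List.mem_cons, ih]
    by_cases h : t = "OP_A"
    · simp [h]
    · simp [h, Ne.symm h]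

theorem pvA_scanO_eq (l : List String) :
    pvA_scanO l = if "OP_O" ∈ l then some "OP_O" else none := by
  induction l with
  | nil => rfl
  | cons t rest ih =>
    simp only [pvA_scanO, List.mem_cons, ih]
    by_cases h : t = "OP_O"
    · simp [h]
    · simp [h, Ne.symm h]

-- closed characterisation of B's loop
theorem pvB_loop_eq (l : List String) (sawO : Bool) :
    pvB_loop l sawO =
      if "OP_A" ∈ l then some "OP_A"
      else if sawO || "OP_O" ∈ l then some "OP_O" else none := by
  induction l generalizing sawO with
  | nil => cases sawO <;> simp [pvB_loop]
  | cons t rest ih =>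
    simp only [pvB_loop, List.mem_cons, ih]
    by_cases hA : t = "OP_A"
    · simp [hA]
    · by_cases hO : t = "OP_O"
      · cases sawO <;> simp [hO, eq_false (Ne.symm hA)]
      · cases sawO <;> simp [hA, hO, eq_false (Ne.symm hA), eq_false (Ne.symm hO)]

-- ===== VERDICT (by name: the statement is the Claim_ definition above) =====
theorem get_term_pos_type_op_py_spec : Claim_equal_get_term_pos_type_op_py := by
  intro l _
  unfold Spec_get_term_pos_type_op_py get_term_pos_type_op_py get_term_pos_type_op_py_alt
  rw [pvA_scanA_eq, pvA_scanO_eq, pvB_loop_eq]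
  by_cases hA : "OP_A" ∈ l
  · simp [hA]
  · by_cases hO : "OP_O" ∈ l <;> simp [hA, hO]
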